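-- pv_equiv track=rewrite | github.com/timothee-florian/hackerrank | problem_solving/simples.py | jumpingOnClouds2
-- ===== SOURCE A (Python) =====
-- def jumpingOnClouds2(c, k):
--     n = len(c)
--     energy = 100
--     i = 0
--     while True:
--         energy -= 1
--         if c[i] == 1:
--             energy -= 2
--         i = (i + k)%n
--         if i == 0:
--             break
--     return energy
-- ===== SOURCE B (Python) =====
-- def jumpingOnClouds2(c, k):
--     # Closed-form cycle length: the walk 0, k, 2k, ... (mod n) returns to 0
--     # after exactly m = n // gcd(n, k % n) steps; count the thunderheads on
--     # those m positions directly instead of simulating until the break.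
--     n = len(c)
--     a, b = n, k % n
--     while b:
--         a, b = b, a % b
--     m = n // a
--     return 100 - m - 2 * sum(1 for j in range(m) if c[(j * k) % n] == 1)
-- ===== Notes on version B (the rewrite author's own statement) =====
-- stated objective: alternative
-- what changed: Replaces A's break-driven while-loop simulation of the cyclic walk with a closed-form cycle length m = n // gcd(n, k % n) followed by a direct count of thunderheads over the m visited positions j*k % n.
-- outside the precondition, e.g. on jumpingOnClouds2([], 3): A raises IndexError, B raises ZeroDivisionError
import Mathlib
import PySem

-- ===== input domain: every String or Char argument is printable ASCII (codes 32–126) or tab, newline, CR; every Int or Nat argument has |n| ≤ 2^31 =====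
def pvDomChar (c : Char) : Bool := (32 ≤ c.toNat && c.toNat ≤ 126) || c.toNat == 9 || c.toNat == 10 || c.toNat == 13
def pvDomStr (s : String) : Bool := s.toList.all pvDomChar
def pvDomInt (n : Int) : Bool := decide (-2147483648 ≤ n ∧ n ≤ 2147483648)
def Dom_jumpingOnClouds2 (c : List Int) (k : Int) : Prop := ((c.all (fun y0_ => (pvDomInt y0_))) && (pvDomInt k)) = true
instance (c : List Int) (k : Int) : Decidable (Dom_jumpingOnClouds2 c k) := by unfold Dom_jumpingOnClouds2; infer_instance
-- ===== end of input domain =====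

-- B replaces A's break-driven simulation by the closed-form cycle length m = n // gcd(n, k % n)
-- and a direct count over the m visited positions (objective: alternative decomposition).
-- Pre_ excludes the empty list, on which A raises IndexError (and B ZeroDivisionError).


-- ===== PORT A =====
-- while True: energy -= 1; if c[i]==1: energy -= 2; i = (i+k)%n; if i==0: break
-- fuel bounds the recursion only (the loop returns within c.length iterations on Pre_).
def loopA (c : List Int) (k n : Int) : Nat → Int → Int → Int
  | 0, _, energy => energy
  | fuel+1, i, energy =>
    let e1 := energy - 1
    let e2 := if PySem.List.pyGetD c i 0 == 1 then e1 - 2 else e1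
    let i' := PySem.Int.mod (i + k) n
    if i' = 0 then e2 else loopA c k n fuel i' e2

def jumpingOnClouds2 (c : List Int) (k : Int) : Int :=
  loopA c k (c.length : Int) c.length 0 100

-- ===== PORT B =====
-- hand-written Euclid loop from Source B: while b: a, b = b, a % b
def pyGcdLoop (a b : Int) : Int :=
  if hb0 : b = 0 then a else pyGcdLoop b (PySem.Int.mod a b)
termination_by b.natAbs
decreasing_by
  have h1 := PySem.Int.mod_nonneg a (b := b)
  have h2 := PySem.Int.mod_lt a (b := b)
  have h3 := PySem.Int.mod_neg_bounds a (b := b)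
  rcases lt_trichotomy b 0 with hb | hb | hb
  · have := h3 hb; omega
  · exact absurd hb hb0
  · have := h1 hb; have := h2 hb; omega

def jumpingOnClouds2_alt (c : List Int) (k : Int) : Int :=
  let n : Int := c.length
  let m : Int := PySem.Int.floordiv n (pyGcdLoop n (PySem.Int.mod k n))
  100 - m - 2 * ((PySem.List.pyRange 0 m 1).foldl
    (fun acc j => if PySem.List.pyGetD c (PySem.Int.mod (j * k) n) 0 == 1 then acc + 1 else acc) 0)

-- ===== PRECONDITION & SPEC =====
-- A indexes c[0] unconditionally, so it raises IndexError on the empty list; that input is excluded.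
def Pre_jumpingOnClouds2 (c : List Int) (k : Int) : Prop := c ≠ []
instance (c : List Int) (k : Int) : Decidable (Pre_jumpingOnClouds2 c k) := by
  unfold Pre_jumpingOnClouds2; infer_instance

def pvWitness_jumpingOnClouds2 : List Int × Int := ([0, 1, 0, 1], 2)

def Spec_jumpingOnClouds2 (c : List Int) (k : Int) (out : Int) : Prop := out = jumpingOnClouds2_alt c k
instance (c : List Int) (k : Int) (out : Int) : Decidable (Spec_jumpingOnClouds2 c k out) := by unfold Spec_jumpingOnClouds2; infer_instance

-- ===== CLAIM (what is proved, stated in full; the proofs are below) =====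
def Claim_equal_jumpingOnClouds2 : Prop := ∀ (c : List Int) (k : Int), Dom_jumpingOnClouds2 c k → Pre_jumpingOnClouds2 c k → Spec_jumpingOnClouds2 c k (jumpingOnClouds2 c k)

-- ===== LEMMAS AND PROOFS =====

-- Euclid loop computes Nat.gcd on nonnegative inputs
theorem pyGcdLoop_eq_gcd (a b : Nat) : pyGcdLoop (a : Int) (b : Int) = (Nat.gcd a b : Int) := by
  induction b using Nat.strong_induction_on generalizing a with
  | _ b ih =>
    rw [pyGcdLoop]
    by_cases hb : b = 0
    · subst hb; simp
    · have hbz : (b : Int) ≠ 0 := by exact_mod_cast hb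
      rw [dif_neg hbz, PySem.Int.mod_natCast]
      rw [ih (a % b) (Nat.mod_lt _ (Nat.pos_of_ne_zero hb)) b]
      rw [Nat.gcd_comm a b, Nat.gcd_rec b a, Nat.gcd_comm]

-- count of thunderhead positions t ∈ [j, j+l)
def cnt (P : Nat → Bool) : Nat → Nat → Int
  | 0, _ => 0
  | l+1, j => (if P j then 1 else 0) + cnt P l (j+1)

theorem cnt_succ_right (P : Nat → Bool) (l j : Nat) :
    cnt P (l+1) j = cnt P l j + (if P (j+l) then 1 else 0) := by
  induction l generalizing j with
  | zero => simp [cnt]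
  | succ l ih =>
    show (if P j then (1:Int) else 0) + cnt P (l+1) (j+1)
        = (if P j then (1:Int) else 0) + cnt P l (j+1) + (if P (j+(l+1)) then 1 else 0)
    rw [ih (j+1), show j + 1 + l = j + (l+1) by omega]
    ring

-- divisibility characterisation: n ∣ j*k ↔ m ∣ j, for m = n / gcd n (k % n)
theorem dvd_iff_m_dvd (n : Nat) (hn : 0 < n) (r : Nat) (hr : Nat.gcd n r ∣ r) (j : Nat) :
    (n ∣ j * r ↔ n / Nat.gcd n r ∣ j) := by
  set d := Nat.gcd n r with hd
  have hdpos : 0 < d := Nat.gcd_pos_of_pos_left r hn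
  have hdn : d ∣ n := Nat.gcd_dvd_left n r
  have hco : Nat.Coprime (n / d) (r / d) := Nat.coprime_div_gcd_div_gcd hdpos
  constructor
  · intro h
    have h2 : n / d ∣ j * (r / d) := by
      rcases h with ⟨q, hq⟩
      refine ⟨q, ?_⟩
      have : d * (n / d * q) = d * (j * (r / d)) := by
        rw [← Nat.mul_assoc, Nat.mul_div_cancel' hdn]
        rw [show d * (j * (r / d)) = j * (d * (r / d)) by ring, Nat.mul_div_cancel' hr]
        omega
      exact (Nat.eq_of_mul_eq_mul_left hdpos this).symm
    exact (Nat.Coprime.dvd_of_dvd_mul_right hco) h2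
  · intro ⟨q, hq⟩
    subst hq
    have : n ∣ (n / d) * r := by
      rcases hr with ⟨s, hs⟩
      refine ⟨s, ?_⟩
      rw [hs, ← Nat.mul_assoc, Nat.div_mul_cancel hdn]
    exact dvd_trans this ⟨q, by ring⟩

-- one loop step advances the position from (j*k)%n to ((j+1)*k)%n
theorem mod_step (k n : Int) (hn : 0 < n) (j : Nat) :
    PySem.Int.mod (PySem.Int.mod ((j : Int) * k) n + k) n
      = PySem.Int.mod (((j : Nat) + 1 : Nat) * k) n := by
  rw [PySem.Int.mod_eq_emod_of_pos hn, PySem.Int.mod_eq_emod_of_pos hn,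
      PySem.Int.mod_eq_emod_of_pos hn]
  push_cast
  rw [Int.add_emod ((j : Int) * k % n) k n, Int.emod_emod_of_dvd _ dvd_rfl, ← Int.add_emod]
  congr 1
  ring

-- characterisation of A's loop on the orbit of 0
theorem loopA_char (c : List Int) (k : Int) (n m : Nat) (hn : 0 < (n : Int))
    (hdvd : ∀ j : Nat, ((n : Int) ∣ (j : Int) * k ↔ m ∣ j))
    (P : Nat → Bool)
    (hP : ∀ t : Nat, P t = (PySem.List.pyGetD c (PySem.Int.mod ((t : Int) * k) (n : Int)) 0 == 1)) :
    ∀ (f j : Nat) (e : Int), j < m → m ≤ j + f →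
      loopA c k n f (PySem.Int.mod ((j : Int) * k) (n : Int)) e
        = e - ((m : Int) - (j : Int)) - 2 * cnt P (m - j) j := by
  intro f
  induction f with
  | zero => intro j e h1 h2; omega
  | succ f ih =>
    intro j e h1 h2
    simp only [loopA]
    rw [mod_step k n hn j, ← hP j]
    by_cases hj : j + 1 = m
    · have hz : PySem.Int.mod (((j + 1 : Nat) : Int) * k) n = 0 := by
        rw [PySem.Int.mod_eq_zero_iff_dvd]
        exact (hdvd (j + 1)).mpr (hj ▸ dvd_refl m)
      rw [if_pos hz]
      have hmj : m - j = 1 := by omega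
      rw [hmj]
      show _ = e - ((m : Int) - j) - 2 * ((if P j then 1 else 0) + cnt P 0 (j + 1))
      have : ((m : Int) - j) = 1 := by omega
      rw [this]
      cases hpj : P j <;> simp [cnt, hpj] <;> omega
    · have hnz : ¬ PySem.Int.mod (((j + 1 : Nat) : Int) * k) n = 0 := by
        rw [PySem.Int.mod_eq_zero_iff_dvd]
        intro hd
        have := (hdvd (j + 1)).mp hd
        have := Nat.le_of_dvd (by omega) this
        omega
      rw [if_neg hnz]
      rw [ih (j + 1) _ (by omega) (by omega)]
      have hmj : m - j = (m - (j + 1)) + 1 := by omega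
      rw [hmj]
      show _ = e - ((m : Int) - j) - 2 * ((if P j then 1 else 0) + cnt P (m - (j + 1)) (j + 1))
      have hc : ((m : Int) - ((j : Int) + 1)) = (m : Int) - j - 1 := by ring
      push_cast
      cases hpj : P j <;> simp [hpj] <;> ring

-- n ∣ j*k ↔ m ∣ j for m = n / gcd(n, k mod n)
theorem m_dvd_char (n : Nat) (hn : 0 < n) (k : Int) (j : Nat) :
    ((n : Int) ∣ (j : Int) * k ↔ (n / Nat.gcd n (PySem.Int.mod k (n : Int)).toNat) ∣ j) := by
  have hnz : (0 : Int) < (n : Int) := by exact_mod_cast hn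
  set r : Int := PySem.Int.mod k (n : Int) with hr
  have hre : r = k % (n : Int) := PySem.Int.mod_eq_emod_of_pos hnz
  have hr0 : 0 ≤ r := hre ▸ Int.emod_nonneg k (by omega)
  have hmodeq : (j : Int) * k ≡ (j : Int) * r [ZMOD (n : Int)] := by
    refine Int.ModEq.mul_left _ ?_
    show k % (n : Int) = r % (n : Int)
    rw [hre, Int.emod_emod_of_dvd _ dvd_rfl]
  have h1 : ((n : Int) ∣ (j : Int) * k ↔ (n : Int) ∣ (j : Int) * r) := by
    constructor
    · intro h
      exact (Int.modEq_zero_iff_dvd).mp (hmodeq.symm.trans ((Int.modEq_zero_iff_dvd).mpr h))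
    · intro h
      exact (Int.modEq_zero_iff_dvd).mp (hmodeq.trans ((Int.modEq_zero_iff_dvd).mpr h))
  rw [h1]
  have hcast : (j : Int) * r = ((j * r.toNat : Nat) : Int) := by
    push_cast [Int.toNat_of_nonneg hr0]; ring
  rw [hcast, Int.natCast_dvd_natCast]
  exact dvd_iff_m_dvd n hn r.toNat (Nat.gcd_dvd_right _ _) j

-- the right-fold count over range equals cnt
theorem foldl_count_eq_cnt (P : Nat → Bool) (l : Nat) (a : Int) :
    (List.range l).foldl (fun acc t => if P t then acc + 1 else acc) a = a + cnt P l 0 := by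
  induction l generalizing a with
  | zero => simp [cnt]
  | succ l ih =>
    rw [List.range_succ, List.foldl_append, ih]
    show (fun acc t => if P t then acc + 1 else acc) (a + cnt P l 0) l = _
    rw [show cnt P (l + 1) 0 = cnt P l 0 + (if P (0 + l) then 1 else 0) from cnt_succ_right P l 0]
    simp only [Nat.zero_add]
    cases hpl : P l <;> simp [hpl] <;> omega

-- ===== VERDICT (by name: the statement is the Claim_ definition above) =====
theorem jumpingOnClouds2_spec : Claim_equal_jumpingOnClouds2 := by
  unfold Claim_equal_jumpingOnClouds2
  intro c k _ hpre
  unfold Spec_jumpingOnClouds2 Pre_jumpingOnClouds2 at *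
  have hn : 0 < c.length := List.length_pos_iff.mpr hpre
  have hnz : (0 : Int) < (c.length : Int) := by exact_mod_cast hn
  set n : Nat := c.length with hdefn
  set d : Nat := Nat.gcd n (PySem.Int.mod k (n : Int)).toNat with hdefd
  set m : Nat := n / d with hdefm
  have hd0 : 0 < d := Nat.gcd_pos_of_pos_left _ hn
  have hm0 : 0 < m := Nat.div_pos (Nat.le_of_dvd hn (Nat.gcd_dvd_left _ _)) hd0
  have hmn : m ≤ n := Nat.div_le_self n d
  set P : Nat → Bool :=
    fun t => PySem.List.pyGetD c (PySem.Int.mod ((t : Int) * k) (n : Int)) 0 == 1 with hdefP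
  -- A's side
  have hA : jumpingOnClouds2 c k = 100 - (m : Int) - 2 * cnt P m 0 := by
    unfold jumpingOnClouds2
    have h0 : PySem.Int.mod (((0 : Nat) : Int) * k) (n : Int) = 0 := by
      rw [PySem.Int.mod_eq_zero_iff_dvd]
      push_cast
      simp
    have hchar := loopA_char c k n m hnz (fun j => m_dvd_char n hn k j) P (fun t => rfl) n 0 100
      hm0 (by omega)
    rw [h0] at hchar
    rw [← hdefn, hchar]
    simp
  -- B's side
  have hgcd : pyGcdLoop (n : Int) (PySem.Int.mod k (n : Int)) = (d : Int) := by
    have : PySem.Int.mod k (n : Int) = (((PySem.Int.mod k (n : Int)).toNat : Nat) : Int) := by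
      rw [Int.toNat_of_nonneg (by
        rw [PySem.Int.mod_eq_emod_of_pos hnz]; exact Int.emod_nonneg k (by omega))]
    rw [this, pyGcdLoop_eq_gcd n _]
  have hB : jumpingOnClouds2_alt c k = 100 - (m : Int) - 2 * cnt P m 0 := by
    simp only [jumpingOnClouds2_alt]
    rw [← hdefn, hgcd]
    have hmint : PySem.Int.floordiv (n : Int) (d : Int) = (m : Int) := by
      exact_mod_cast PySem.Int.floordiv_natCast n d
    rw [hmint]
    have hrange : PySem.List.pyRange 0 (m : Int) 1 = (List.range m).map (fun t : Nat => (t : Int)) := by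
      rw [PySem.List.pyRange_one 0 (m : Int)]
      simp
    rw [hrange, List.foldl_map, foldl_count_eq_cnt P m 0]
    ring
  rw [hA, hB]
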